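-- pv_equiv track=rewrite | github.com/eliottcassidy2000/math | 04-computation/fibonacci_pascal_3strand.py | weighted_trinomial_row
-- ===== SOURCE A (Python) =====
-- def weighted_trinomial_row(n, a=1, b=2, c=2):
--     """Row n of the (a + b*x + c*x^2)^n triangle."""
--     row = [1]
--     for _ in range(n):
--         new_row = [0] * (len(row) + 2)
--         for i, val in enumerate(row):
--             new_row[i] += a * val
--             new_row[i + 1] += b * val
--             new_row[i + 2] += c * val
--         row = new_row
--     return row
-- ===== SOURCE B (Python) =====
-- def weighted_trinomial_row(n, a=1, b=2, c=2):
--     """Row n of the (a + b*x + c*x^2)^n triangle, by binary exponentiation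
--     of the polynomial (exponentiation by squaring with a generic convolution)."""
--     def mul(p, q):
--         return [sum(p[i] * q[k - i]
--                     for i in range(k + 1)
--                     if i < len(p) and k - i < len(q))
--                 for k in range(len(p) + len(q) - 1)]
--
--     def pw(e):
--         if e <= 0:
--             return [1]
--         h = pw(e // 2)
--         s = mul(h, h)
--         return mul(s, [a, b, c]) if e % 2 else s
--
--     return pw(n)
-- ===== Notes on version B (the rewrite author's own statement) =====
-- stated objective: alternative
-- what changed: A builds row n by n successive scatter-convolutions with (a,b,c); B computes the polynomial power directly by recursive exponentiation-by-squaring with a generic polynomial-convolution helper (O(log n) squarings instead of n linear update passes).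
import Mathlib
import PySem

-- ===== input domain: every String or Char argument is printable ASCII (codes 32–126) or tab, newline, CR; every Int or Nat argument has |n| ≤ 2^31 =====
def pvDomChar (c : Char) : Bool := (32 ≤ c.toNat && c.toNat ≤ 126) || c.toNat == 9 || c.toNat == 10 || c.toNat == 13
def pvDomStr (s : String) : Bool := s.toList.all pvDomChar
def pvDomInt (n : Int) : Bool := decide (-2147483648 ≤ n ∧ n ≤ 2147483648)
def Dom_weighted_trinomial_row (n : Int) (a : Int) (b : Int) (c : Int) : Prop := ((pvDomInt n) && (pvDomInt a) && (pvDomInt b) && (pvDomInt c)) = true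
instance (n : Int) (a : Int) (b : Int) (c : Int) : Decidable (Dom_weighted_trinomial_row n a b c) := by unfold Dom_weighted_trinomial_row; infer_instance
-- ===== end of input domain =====

-- B computes the row by recursive exponentiation-by-squaring of the polynomial with a generic
-- convolution helper, instead of A's n successive scatter passes (objective: alternative).


-- ===== PORT A =====
-- inner loop: new_row[i] += a*val; new_row[i+1] += b*val; new_row[i+2] += c*val
-- (enumerate indices are ≥ 0 and all three writes are in range, so .toNat / List.set are exact here)
def pvStepA (a b c : Int) (row : List Int) : List Int :=
  (PySem.List.enumerate row 0).foldl
    (fun nr iv =>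
      let nr1 := nr.set iv.1.toNat (nr.getD iv.1.toNat 0 + a * iv.2)
      let nr2 := nr1.set (iv.1.toNat + 1) (nr1.getD (iv.1.toNat + 1) 0 + b * iv.2)
      nr2.set (iv.1.toNat + 2) (nr2.getD (iv.1.toNat + 2) 0 + c * iv.2))
    (List.replicate (row.length + 2) 0)

def weighted_trinomial_row (n : Int) (a : Int) (b : Int) (c : Int) : List Int :=
  (PySem.List.pyRange 0 n 1).foldl (fun row _ => pvStepA a b c row) [1]

-- ===== PORT B =====
-- mul(p, q): convolution; indices i and k-i are ≥ 0 inside the guard, so .toNat/getD are exact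
def pvMul (p q : List Int) : List Int :=
  (PySem.List.pyRange 0 ((p.length : Int) + (q.length : Int) - 1) 1).map (fun k =>
    ((PySem.List.pyRange 0 (k + 1) 1).map (fun i =>
       if i < (p.length : Int) ∧ k - i < (q.length : Int) then
         p.getD i.toNat 0 * q.getD (k - i).toNat 0
       else 0)).sum)

-- pw(e): exponentiation by squaring
def pvPw (a b c : Int) (e : Int) : List Int :=
  if e ≤ 0 then [1]
  else
    let hh := pvPw a b c (PySem.Int.floordiv e 2)
    let s := pvMul hh hh
    if PySem.Int.mod e 2 ≠ 0 then pvMul s [a, b, c] else s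
termination_by e.toNat
decreasing_by
  rw [PySem.Int.floordiv_eq_ediv_of_pos (by omega)]
  omega

def weighted_trinomial_row_alt (n : Int) (a : Int) (b : Int) (c : Int) : List Int :=
  pvPw a b c n

-- ===== PRECONDITION & SPEC =====
def Spec_weighted_trinomial_row (n : Int) (a : Int) (b : Int) (c : Int) (out : List Int) : Prop := out = weighted_trinomial_row_alt n a b c
instance (n : Int) (a : Int) (b : Int) (c : Int) (out : List Int) : Decidable (Spec_weighted_trinomial_row n a b c out) := by unfold Spec_weighted_trinomial_row; infer_instance

-- ===== CLAIM (what is proved, stated in full; the proofs are below) =====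
def Claim_equal_weighted_trinomial_row : Prop := ∀ (n : Int) (a : Int) (b : Int) (c : Int), Dom_weighted_trinomial_row n a b c → Spec_weighted_trinomial_row n a b c (weighted_trinomial_row n a b c)

-- ===== LEMMAS AND PROOFS =====

-- both programs are compared through the polynomial their coefficient list denotes

theorem pvSumRange (n : ℕ) (f : ℕ → ℤ) : ((List.range n).map f).sum = ∑ i ∈ Finset.range n, f i := rfl

noncomputable def pvToPoly (l : List Int) : Polynomial ℤ :=
  ∑ i ∈ Finset.range l.length, Polynomial.C (l.getD i 0) * Polynomial.X ^ i

theorem pvToPoly_coeff (l : List Int) (k : Nat) : (pvToPoly l).coeff k = l.getD k 0 := by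
  by_cases hk : k < l.length
  · simp [pvToPoly, Polynomial.finset_sum_coeff, Polynomial.coeff_X_pow, Finset.sum_ite_eq, hk]
  · simp [pvToPoly, Polynomial.finset_sum_coeff, Polynomial.coeff_X_pow, Finset.sum_ite_eq, hk]

theorem pvList_ext (l1 l2 : List Int) (hlen : l1.length = l2.length)
    (hp : pvToPoly l1 = pvToPoly l2) : l1 = l2 := by
  apply List.ext_getElem hlen
  intro i h1 h2
  have h := congrArg (fun p => Polynomial.coeff p i) hp
  simp only [pvToPoly_coeff] at h
  rwa [List.getD_eq_getElem _ _ h1, List.getD_eq_getElem _ _ h2] at h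

theorem pvMul_length (p q : List Int) :
    (pvMul p q).length = ((p.length : Int) + (q.length : Int) - 1).toNat := by
  simp [pvMul, PySem.List.length_pyRange_one]

theorem pvMul_getD (p q : List Int) (k : Nat) :
    (pvMul p q).getD k 0 = ∑ i ∈ Finset.range (k + 1), p.getD i 0 * q.getD (k - i) 0 := by
  by_cases hk : k < (pvMul p q).length
  · rw [List.getD_eq_getElem _ _ hk]
    simp only [pvMul, List.getElem_map, PySem.List.getElem_pyRange_one]
    rw [show ((0 : Int) + (k : Int)) = (k : Int) by ring]
    rw [PySem.List.pyRange_one]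
    rw [show (((k : Int) + 1) - 0).toNat = k + 1 by omega]
    rw [List.map_map, pvSumRange]
    apply Finset.sum_congr rfl
    intro i hi
    have hik : i ≤ k := by simpa [Nat.lt_succ_iff] using hi
    simp only [Function.comp]
    rw [show ((0 : Int) + (i : Int)) = (i : Int) by ring]
    by_cases h1 : (i : Int) < (p.length : Int)
    · by_cases h2 : (k : Int) - (i : Int) < (q.length : Int)
      · rw [if_pos ⟨h1, h2⟩, show ((i : Int)).toNat = i by omega,
          show ((k : Int) - (i : Int)).toNat = k - i by omega]
      · rw [if_neg (by tauto)]
        rw [List.getD_eq_default q _ (by omega)]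
        ring
    · rw [if_neg (by tauto)]
      rw [List.getD_eq_default p _ (by omega)]
      ring
  · rw [List.getD_eq_default _ _ (Nat.le_of_not_lt hk)]
    rw [pvMul_length] at hk
    symm
    apply Finset.sum_eq_zero
    intro i hi
    have hik : i ≤ k := by simpa [Nat.lt_succ_iff] using hi
    by_cases h1 : i < p.length
    · rw [List.getD_eq_default q _ (by omega)]; ring
    · rw [List.getD_eq_default p _ (by omega)]; ring

theorem pvToPoly_mul (p q : List Int) : pvToPoly (pvMul p q) = pvToPoly p * pvToPoly q := by
  apply Polynomial.ext
  intro k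
  rw [pvToPoly_coeff, pvMul_getD, Polynomial.coeff_mul,
    Finset.Nat.sum_antidiagonal_eq_sum_range_succ_mk]
  exact Finset.sum_congr rfl fun i _ => by rw [pvToPoly_coeff, pvToPoly_coeff]

theorem pvPw_spec (a b c : Int) : ∀ (m : Nat) (e : Int), e.toNat ≤ m →
    (pvPw a b c e).length = 2 * e.toNat + 1 ∧
      pvToPoly (pvPw a b c e) = (pvToPoly [a, b, c]) ^ e.toNat := by
  intro m
  induction m with
  | zero =>
    intro e he
    rw [pvPw, if_pos (by omega : e ≤ 0)]
    refine ⟨by simp; omega, ?_⟩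
    rw [show e.toNat = 0 by omega, pow_zero]
    simp [pvToPoly]
  | succ m ih =>
    intro e he
    rw [pvPw]
    by_cases he0 : e ≤ 0
    · rw [if_pos he0]
      refine ⟨by simp; omega, ?_⟩
      rw [show e.toNat = 0 by omega, pow_zero]
      simp [pvToPoly]
    · rw [if_neg he0]
      have h2 : PySem.Int.floordiv e 2 = e / 2 := PySem.Int.floordiv_eq_ediv_of_pos (by omega)
      have hq : (e / 2).toNat ≤ m := by omega
      obtain ⟨ihl, ihp⟩ := ih (e / 2) hq
      have hmod : PySem.Int.mod e 2 = e % 2 := PySem.Int.mod_eq_emod_of_pos (by omega)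
      set t := (e / 2).toNat with ht
      have hsl : (pvMul (pvPw a b c (PySem.Int.floordiv e 2)) (pvPw a b c (PySem.Int.floordiv e 2))).length = 4 * t + 1 := by
        rw [pvMul_length, h2, ihl]; push_cast; omega
      have hsp : pvToPoly (pvMul (pvPw a b c (PySem.Int.floordiv e 2)) (pvPw a b c (PySem.Int.floordiv e 2))) = (pvToPoly [a, b, c]) ^ (2 * t) := by
        rw [pvToPoly_mul, h2, ihp, ← pow_add]; ring_nf
      by_cases hodd : PySem.Int.mod e 2 ≠ 0
      · rw [if_pos hodd]
        have het : e.toNat = 2 * t + 1 := by rw [hmod] at hodd; omega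
        constructor
        · rw [pvMul_length, hsl, het]; simp only [List.length_cons, List.length_nil]; push_cast; omega
        · rw [pvToPoly_mul, hsp, het, ← pow_succ]
      · rw [if_neg hodd]
        have het : e.toNat = 2 * t := by rw [hmod] at hodd; omega
        exact ⟨by rw [hsl, het]; omega, by rw [hsp, het]⟩

-- A-side: "row value at shifted position": pvG xs s j = xs[j - s] if defined, else 0
def pvG (xs : List Int) (s : Int) (j : Nat) : Int :=
  if s ≤ (j : Int) then xs.getD ((j : Int) - s).toNat 0 else 0

theorem pvG_nil (s : Int) (j : Nat) : pvG [] s j = 0 := by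
  simp [pvG, List.getD]

theorem pvG_cons (v : Int) (rest : List Int) (s : Int) (j : Nat) :
    pvG (v :: rest) s j = (if (j : Int) = s then v else 0) + pvG rest (s + 1) j := by
  unfold pvG
  rcases lt_trichotomy (j : Int) s with h | h | h
  · rw [if_neg (by omega), if_neg (by omega), if_neg (by omega)]; ring
  · rw [if_pos (by omega), if_pos (by omega), if_neg (by omega)]
    have h0 : ((j : Int) - s).toNat = 0 := by omega
    simp [h0, List.getD]
  · rw [if_pos (by omega), if_neg (by omega), if_pos (by omega)]
    have h1 : ((j : Int) - s).toNat = (((j : Int) - (s + 1)).toNat) + 1 := by omega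
    simp [h1, List.getD]

theorem pv_getD_set_self (l : List Int) (i : Nat) (h : i < l.length) (x : Int) :
    (l.set i x).getD i 0 = x := by
  simp [List.getD, h]

theorem pv_getD_set_ne (l : List Int) (i j : Nat) (hij : i ≠ j) (x : Int) :
    (l.set i x).getD j 0 = l.getD j 0 := by
  simp [List.getD, hij]

-- the inner scatter fold of A, abstracted over the enumerate list
def pvScat (a b c : Int) (l : List (Int × Int)) (acc : List Int) : List Int :=
  l.foldl
    (fun nr iv =>
      let nr1 := nr.set iv.1.toNat (nr.getD iv.1.toNat 0 + a * iv.2)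
      let nr2 := nr1.set (iv.1.toNat + 1) (nr1.getD (iv.1.toNat + 1) 0 + b * iv.2)
      nr2.set (iv.1.toNat + 2) (nr2.getD (iv.1.toNat + 2) 0 + c * iv.2))
    acc

theorem pvScat_length (a b c : Int) (l : List (Int × Int)) :
    ∀ acc : List Int, (pvScat a b c l acc).length = acc.length := by
  induction l with
  | nil => intro acc; rfl
  | cons hd tl ih =>
    intro acc
    rw [show pvScat a b c (hd :: tl) acc = pvScat a b c tl
        (let nr1 := acc.set hd.1.toNat (acc.getD hd.1.toNat 0 + a * hd.2)
         let nr2 := nr1.set (hd.1.toNat + 1) (nr1.getD (hd.1.toNat + 1) 0 + b * hd.2)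
         nr2.set (hd.1.toNat + 2) (nr2.getD (hd.1.toNat + 2) 0 + c * hd.2)) from rfl, ih]
    simp

theorem pvScat_getD (a b c : Int) (xs : List Int) (j : Nat) :
    ∀ (s : Int), 0 ≤ s → ∀ (acc : List Int), s + xs.length + 2 ≤ acc.length →
    (pvScat a b c (PySem.List.enumerate xs s) acc).getD j 0 =
      acc.getD j 0 + a * pvG xs s j + b * pvG xs (s + 1) j + c * pvG xs (s + 2) j := by
  induction xs with
  | nil => intro s hs acc hlen; simp [PySem.List.enumerate_nil, pvScat, pvG_nil]
  | cons v rest ih =>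
    intro s hs acc hlen
    rw [PySem.List.enumerate_cons]
    set p := s.toNat with hp
    have hps : (p : Int) = s := by omega
    set acc' := (let nr1 := acc.set p (acc.getD p 0 + a * v)
                 let nr2 := nr1.set (p + 1) (nr1.getD (p + 1) 0 + b * v)
                 nr2.set (p + 2) (nr2.getD (p + 2) 0 + c * v)) with hacc'
    have hcons : pvScat a b c ((s, v) :: PySem.List.enumerate rest (s + 1)) acc =
        pvScat a b c (PySem.List.enumerate rest (s + 1)) acc' := rfl
    rw [hcons]
    have hlen0 : s + rest.length + 3 ≤ acc.length := by
      simp only [List.length_cons] at hlen; push_cast at hlen ⊢; omega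
    have hlen' : acc'.length = acc.length := by simp [hacc']
    have hbound : p + 2 < acc.length := by omega
    rw [ih (s + 1) (by omega) acc' (by rw [hlen']; omega)]
    have hgd : acc'.getD j 0 = acc.getD j 0 +
        (if (j : Int) = s then a * v else 0) +
        (if (j : Int) = s + 1 then b * v else 0) +
        (if (j : Int) = s + 2 then c * v else 0) := by
      rcases Nat.lt_trichotomy j p with hc | hc | hc
      · -- j < p : untouched
        rw [hacc']
        simp only []
        rw [pv_getD_set_ne _ _ _ (by omega) _, pv_getD_set_ne _ _ _ (by omega) _,
            pv_getD_set_ne _ _ _ (by omega) _]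
        rw [if_neg (by omega), if_neg (by omega), if_neg (by omega)]; ring
      · -- j = p
        subst hc
        rw [hacc']
        simp only []
        rw [pv_getD_set_ne _ _ _ (by omega) _, pv_getD_set_ne _ _ _ (by omega) _,
            pv_getD_set_self _ _ (by omega) _]
        rw [if_pos (by omega), if_neg (by omega), if_neg (by omega)]; ring
      · rcases Nat.lt_trichotomy j (p + 1) with hd | hd | hd
        · omega
        · -- j = p + 1
          rw [hacc']
          simp only []
          rw [hd, pv_getD_set_ne _ _ _ (by omega) _,
              pv_getD_set_self _ _ (by simp; omega) _,
              pv_getD_set_ne _ _ _ (by omega) _]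
          rw [if_neg (by omega), if_pos (by omega), if_neg (by omega)]; ring
        · rcases Nat.lt_trichotomy j (p + 2) with he | he | he
          · omega
          · -- j = p + 2
            rw [hacc']
            simp only []
            rw [he, pv_getD_set_self _ _ (by simp; omega) _,
                pv_getD_set_ne _ _ _ (by omega) _, pv_getD_set_ne _ _ _ (by omega) _]
            rw [if_neg (by omega), if_neg (by omega), if_pos (by omega)]; ring
          · -- j > p + 2 : untouched
            rw [hacc']
            simp only []
            rw [pv_getD_set_ne _ _ _ (by omega) _, pv_getD_set_ne _ _ _ (by omega) _,
                pv_getD_set_ne _ _ _ (by omega) _]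
            rw [if_neg (by omega), if_neg (by omega), if_neg (by omega)]; ring
    rw [hgd, pvG_cons v rest s j, pvG_cons v rest (s + 1) j, pvG_cons v rest (s + 2) j,
        show s + 1 + 1 = s + 2 from by ring, show s + 2 + 1 = s + 3 from by ring]
    split_ifs <;> ring

theorem pvStepA_length (a b c : Int) (row : List Int) :
    (pvStepA a b c row).length = row.length + 2 := by
  rw [show pvStepA a b c row = pvScat a b c (PySem.List.enumerate row 0)
      (List.replicate (row.length + 2) 0) from rfl, pvScat_length]
  simp

theorem pvStepA_getD (a b c : Int) (row : List Int) (k : Nat) :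
    (pvStepA a b c row).getD k 0 = a * pvG row 0 k + b * pvG row 1 k + c * pvG row 2 k := by
  have h := pvScat_getD a b c row k 0 le_rfl (List.replicate (row.length + 2) 0) (by simp)
  rw [show pvStepA a b c row = pvScat a b c (PySem.List.enumerate row 0)
      (List.replicate (row.length + 2) 0) from rfl, h]
  have hrep : (List.replicate (row.length + 2) (0 : Int)).getD k 0 = 0 := by
    by_cases hk : k < row.length + 2
    · rw [List.getD_eq_getElem _ _ (by simpa using hk)]; simp
    · rw [List.getD_eq_default _ _ (by simpa using Nat.le_of_not_lt hk)]
  rw [hrep]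
  norm_num

theorem pvToPoly_abc (a b c : Int) :
    pvToPoly [a, b, c] = Polynomial.C a + Polynomial.C b * Polynomial.X
      + Polynomial.C c * Polynomial.X ^ 2 := by
  simp [pvToPoly, Finset.sum_range_succ]

theorem pvToPoly_stepA (a b c : Int) (row : List Int) :
    pvToPoly (pvStepA a b c row) = pvToPoly row * pvToPoly [a, b, c] := by
  apply Polynomial.ext
  intro k
  rw [pvToPoly_coeff, pvStepA_getD, pvToPoly_abc]
  have hR : pvToPoly row * (Polynomial.C a + Polynomial.C b * Polynomial.X
      + Polynomial.C c * Polynomial.X ^ 2)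
      = Polynomial.C a * (pvToPoly row * Polynomial.X ^ 0)
        + Polynomial.C b * (pvToPoly row * Polynomial.X ^ 1)
        + Polynomial.C c * (pvToPoly row * Polynomial.X ^ 2) := by ring
  rw [hR]
  simp only [Polynomial.coeff_add, Polynomial.coeff_C_mul, Polynomial.coeff_mul_X_pow',
    pvToPoly_coeff]
  have hg0 : pvG row 0 k = row.getD k 0 := by
    rw [pvG, if_pos (by omega), show ((k : Int) - 0).toNat = k by omega]
  have hg1 : pvG row 1 k = if 1 ≤ k then row.getD (k - 1) 0 else 0 := by
    by_cases h : (1 : Int) ≤ (k : Int)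
    · rw [pvG, if_pos h, if_pos (by omega), show ((k : Int) - 1).toNat = k - 1 by omega]
    · rw [pvG, if_neg h, if_neg (by omega)]
  have hg2 : pvG row 2 k = if 2 ≤ k then row.getD (k - 2) 0 else 0 := by
    by_cases h : (2 : Int) ≤ (k : Int)
    · rw [pvG, if_pos h, if_pos (by omega), show ((k : Int) - 2).toNat = k - 2 by omega]
    · rw [pvG, if_neg h, if_neg (by omega)]
  rw [hg0, hg1, hg2]
  simp

theorem pvFoldA (a b c : Int) (l : List Int) :
    ∀ acc : List Int,
      (l.foldl (fun row _ => pvStepA a b c row) acc).length = acc.length + 2 * l.length ∧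
      pvToPoly (l.foldl (fun row _ => pvStepA a b c row) acc)
        = pvToPoly acc * (pvToPoly [a, b, c]) ^ l.length := by
  induction l with
  | nil => intro acc; simp
  | cons hd tl ih =>
    intro acc
    rw [List.foldl_cons]
    obtain ⟨ihl, ihp⟩ := ih (pvStepA a b c acc)
    constructor
    · rw [ihl, pvStepA_length]; simp; omega
    · rw [ihp, pvToPoly_stepA]
      rw [List.length_cons, pow_succ]
      ring

-- ===== VERDICT (by name: the statement is the Claim_ definition above) =====
theorem weighted_trinomial_row_spec : Claim_equal_weighted_trinomial_row := by
  intro n a b c _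
  unfold Spec_weighted_trinomial_row weighted_trinomial_row weighted_trinomial_row_alt
  obtain ⟨hlen, hpoly⟩ := pvFoldA a b c (PySem.List.pyRange 0 n 1) [1]
  obtain ⟨hlen', hpoly'⟩ := pvPw_spec a b c n.toNat n le_rfl
  apply pvList_ext
  · rw [hlen, hlen']
    simp only [PySem.List.length_pyRange_one, List.length_cons, List.length_nil]
    omega
  · rw [hpoly, hpoly']
    simp only [PySem.List.length_pyRange_one]
    have h1 : pvToPoly [1] = 1 := by
      simp [pvToPoly]
    rw [h1, one_mul]
    congr 1
    omega
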